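-- pv_equiv track=rewrite | github.com/HunterLaugh/codewars_kata_python | 5 kyu Sorting Poker.py | seq_tag
-- ===== SOURCE A (Python) =====
-- def seq_tag(L):
-- 	tag=['N','N','N','N','N','N','N','N','N','N','N','N','N',]
-- 	pokerSort=['2','3','4','5','6','7','8','9','10','J','Q','K','A']
--
-- 	# 如有扑克牌，则tag为'Y'
-- 	for each in L:
-- 		if each in pokerSort:
-- 			index=pokerSort.index(each)
-- 			tag[index]='Y'
--
-- 	res=[]
-- 	i=0
-- 	while i<13:
-- 		if tag[i]=='Y':
-- 			res.append(pokerSort[i])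
-- 		i+=1
--
-- 	return res
-- ===== SOURCE B (Python) =====
-- def seq_tag(L):
--     pokerSort = ['2', '3', '4', '5', '6', '7', '8', '9', '10', 'J', 'Q', 'K', 'A']
--     present = {x for x in L if x in pokerSort}
--     return sorted(present, key=pokerSort.index)
-- ===== Notes on version B (the rewrite author's own statement) =====
-- stated objective: simpler
-- what changed: Replaces A's 13-slot 'N'/'Y' flag table (mutated while scanning L) and its fixed positional while-loop over all 13 slots with a set comprehension that dedups the valid ranks present, followed by sorted(..., key=pokerSort.index).
import Mathlib
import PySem

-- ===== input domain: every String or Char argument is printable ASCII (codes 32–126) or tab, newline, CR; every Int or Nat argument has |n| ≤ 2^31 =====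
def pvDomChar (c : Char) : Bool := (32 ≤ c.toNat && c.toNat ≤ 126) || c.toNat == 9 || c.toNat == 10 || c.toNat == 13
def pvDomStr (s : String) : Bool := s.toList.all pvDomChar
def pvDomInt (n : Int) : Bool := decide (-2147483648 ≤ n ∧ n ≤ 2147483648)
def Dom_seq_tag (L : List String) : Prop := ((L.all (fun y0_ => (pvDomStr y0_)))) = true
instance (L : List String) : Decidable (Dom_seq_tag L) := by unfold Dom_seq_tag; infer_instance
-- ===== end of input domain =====

-- B replaces A's mutable 13-slot 'N'/'Y' flag table and its positional while-loop with a
-- dedup-into-set of the valid ranks present, then sorted by poker-rank index (objective: simpler).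

-- the fixed 13-element rank ordering both programs carry as a local constant
def pvPoker : List String := ["2", "3", "4", "5", "6", "7", "8", "9", "10", "J", "Q", "K", "A"]

-- ===== PORT A =====
def seq_tag (L : List String) : List String :=
  let tag : List String := ["N","N","N","N","N","N","N","N","N","N","N","N","N"]
  let pokerSort := pvPoker
  let tag := L.foldl (fun tag each =>
    if each ∈ pokerSort then
      -- pokerSort.index(each): cannot raise here since each ∈ pokerSort, so the total form is exact
      let index : Nat := (PySem.List.index? pokerSort each).getD 0
      PySem.List.pySetD tag (index : Int) "Y"
    else tag) tag
  -- 'while i < 13' with counter i, appending pokerSort[i] when tag[i] == 'Y'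
  let res := (PySem.List.pyRange 0 13 1).foldl (fun res i =>
    if PySem.List.pyGetD tag i "" = "Y" then res ++ [PySem.List.pyGetD pokerSort i ""] else res) []
  res

-- ===== PORT B =====
def seq_tag_alt (L : List String) : List String :=
  let pokerSort := pvPoker
  let present : PySem.Set String := PySem.Set.ofList (L.filter (fun x => decide (x ∈ pokerSort)))
  PySem.List.sorted present (fun x => (PySem.List.index? pokerSort x).getD 0) false

-- ===== PRECONDITION & SPEC =====
def Spec_seq_tag (L : List String) (out : List String) : Prop := out = seq_tag_alt L
instance (L : List String) (out : List String) : Decidable (Spec_seq_tag L out) := by unfold Spec_seq_tag; infer_instance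

-- ===== CLAIM (what is proved, stated in full; the proofs are below) =====
def Claim_equal_seq_tag : Prop := ∀ (L : List String), Dom_seq_tag L → Spec_seq_tag L (seq_tag L)

-- ===== LEMMAS AND PROOFS =====

-- canonical value both sides reach: the ranks of pokerSort present in L, in pokerSort order
def pvCanon (L : List String) : List String := pvPoker.filter (fun r => decide (r ∈ L))

-- A's loop body as a named step function (definitionally equal to the lambda in seq_tag)
def pvStep (tag : List String) (each : String) : List String :=
  if each ∈ pvPoker then
    let index : Nat := (PySem.List.index? pvPoker each).getD 0
    PySem.List.pySetD tag (index : Int) "Y"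
  else tag

theorem pvStep_len (t : List String) (x : String) : (pvStep t x).length = t.length := by
  unfold pvStep
  split
  · simp [PySem.List.pySetD_natCast]
  · rfl

theorem pvStep_getD (t : List String) (x : String) (ht : t.length = 13)
    (j : Nat) (hj : j < 13) :
    (pvStep t x).getD j "" = if pvPoker.getD j "" = x then "Y" else t.getD j "" := by
  have hjlen : j < pvPoker.length := by simpa [pvPoker] using hj
  have hpj : pvPoker.getD j "" = pvPoker[j] := List.getD_eq_getElem _ _ hjlen
  unfold pvStep
  by_cases hx : x ∈ pvPoker
  · simp only [if_pos hx]
    obtain ⟨k, hk⟩ := (PySem.List.index?_isSome_iff (xs := pvPoker) (v := x)).mpr hx |> Option.isSome_iff_exists.mp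
    obtain ⟨hklt, hkx, -⟩ := PySem.List.getElem_of_index?_eq_some hk
    have heq : pvPoker.getD j "" = x ↔ j = k := by
      rw [hpj, ← hkx]
      constructor
      · intro h
        have := List.nodup_iff_injective_getElem.mp (by decide : pvPoker.Nodup)
          (a₁ := ⟨j, hjlen⟩) (a₂ := ⟨k, hklt⟩) h
        simpa using this
      · intro h; subst h; rfl
    rw [hk]
    simp only [Option.getD_some, PySem.List.pySetD_natCast, heq]
    have hkt : k < t.length := by rw [ht]; simpa [pvPoker] using hklt
    by_cases hjk : j = k
    · subst hjk
      simp [List.getD_eq_getElem?_getD, hkt]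
    · simp [List.getD_eq_getElem?_getD, hjk, Ne.symm hjk]
  · have : pvPoker.getD j "" ≠ x := by
      rw [hpj]; intro h; exact hx (h ▸ List.getElem_mem hjlen)
    simp only [if_neg hx, if_neg this]

theorem pvFold_getD (L : List String) (t : List String) (ht : t.length = 13)
    (j : Nat) (hj : j < 13) :
    (L.foldl pvStep t).getD j "" = if pvPoker.getD j "" ∈ L then "Y" else t.getD j "" := by
  induction L generalizing t with
  | nil => simp
  | cons x L ih =>
    rw [List.foldl_cons, ih (pvStep t x) (by rw [pvStep_len, ht]) ]
    rw [pvStep_getD t x ht j hj]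
    simp only [List.mem_cons]
    split_ifs <;> tauto

theorem pvFilterMapRange {α : Type} (ps : List α) (p : α → Bool) (d : α) :
    ((List.range ps.length).filter (fun k => p (ps.getD k d))).map (fun k => ps.getD k d)
      = ps.filter p := by
  induction ps with
  | nil => simp
  | cons a ps ih =>
    rw [List.length_cons, List.range_succ_eq_map, List.filter_cons, List.filter_map]
    have hcomp : ((fun k => p ((a :: ps).getD k d)) ∘ Nat.succ) = fun k => p (ps.getD k d) := by
      funext k; rfl
    rw [hcomp]
    have hg : ((fun k => (a :: ps).getD k d) ∘ Nat.succ) = fun k => ps.getD k d := by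
      funext k; rfl
    rw [List.filter_cons]
    by_cases hpa : p a = true
    · simp only [List.getD_cons_zero, hpa, if_true, List.map_cons, List.map_map]
      rw [hg, ih]
    · simp only [List.getD_cons_zero, hpa, Bool.false_eq_true, if_false, List.map_map]
      rw [hg, ih]

theorem pvTag_getD (L : List String) (k : Nat) (hk : k < 13) :
    (L.foldl pvStep (List.replicate 13 "N")).getD k "" =
      if pvPoker.getD k "" ∈ L then "Y" else "N" := by
  rw [pvFold_getD L _ (by simp) k hk, List.getD_replicate _ (by simpa using hk)]

theorem seq_tag_eq_canon (L : List String) :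
    (PySem.List.pyRange 0 13 1).foldl (fun res i =>
      if PySem.List.pyGetD (L.foldl pvStep (List.replicate 13 "N")) i "" = "Y" then
        res ++ [PySem.List.pyGetD pvPoker i ""] else res) [] = pvCanon L := by
  rw [PySem.List.foldl_append_ite, List.nil_append]
  have hrange : PySem.List.pyRange 0 13 1 = (List.range 13).map (fun k : Nat => ((k : Nat) : Int)) := by decide
  rw [hrange]
  simp only [List.filter_map, List.map_map, Function.comp_def, PySem.List.pyGetD_natCast]
  rw [List.filter_congr (l := List.range 13)
      (q := fun k => decide (pvPoker.getD k "" ∈ L)) ?_]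
  · exact pvFilterMapRange pvPoker (fun r => decide (r ∈ L)) ""
  · intro k hk
    rw [List.mem_range] at hk
    rw [pvTag_getD L k hk]
    by_cases h : pvPoker.getD k "" ∈ L <;> simp only [if_pos, if_neg, h, decide_true, decide_false, if_true, if_false] <;> decide

theorem seq_tag_alt_eq_canon (L : List String) : seq_tag_alt L = pvCanon L := by
  show PySem.List.sorted (PySem.Set.ofList (L.filter (fun x => decide (x ∈ pvPoker))))
      (fun x => (PySem.List.index? pvPoker x).getD 0) false = pvCanon L
  apply PySem.List.sorted_eq_of_perm_of_pairwise_lt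
  · rw [List.perm_ext_iff_of_nodup]
    · intro a
      simp [pvCanon, List.mem_filter, PySem.Set.mem_ofList, and_comm]
    · exact List.Nodup.filter _ (by decide)
    · exact PySem.Set.nodup_ofList _
  · exact List.Pairwise.filter _ (by decide)

-- ===== VERDICT (by name: the statement is the Claim_ definition above) =====
theorem seq_tag_spec : Claim_equal_seq_tag := by
  intro L _
  unfold Spec_seq_tag
  rw [seq_tag_alt_eq_canon]
  exact seq_tag_eq_canon L
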